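-- pv_equiv track=rewrite | github.com/MichielRobeyn/AoC2023 | day06-10/day8a_wasteland.py | run_through
-- ===== SOURCE A (Python) =====
-- def run_through(instructions, nodes, end, steps):
--     for instruction in instructions:
--         if end != 'ZZZ':
--             end = nodes[end][instruction]
--             steps += 1
--         else:
--             return steps
--     return run_through(instructions, nodes, end, steps)
-- ===== SOURCE B (Python) =====
-- def run_through(instructions, nodes, end, steps):
--     i = 0
--     n = len(instructions)
--     while True:
--         if end == 'ZZZ':
--             return steps
--         end = nodes[end][instructions[i]]
--         steps += 1
--         i = (i + 1) % n
-- ===== Notes on version B (the rewrite author's own statement) =====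
-- stated objective: idiomatic
-- what changed: Replaced A's per-pass for-loop plus tail self-recursion (recursing to restart the instruction list) by a single flat while-True loop over an endless instruction stream via an index advanced (i+1) % len(instructions), with the ZZZ check at the top of each iteration.
import Mathlib
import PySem

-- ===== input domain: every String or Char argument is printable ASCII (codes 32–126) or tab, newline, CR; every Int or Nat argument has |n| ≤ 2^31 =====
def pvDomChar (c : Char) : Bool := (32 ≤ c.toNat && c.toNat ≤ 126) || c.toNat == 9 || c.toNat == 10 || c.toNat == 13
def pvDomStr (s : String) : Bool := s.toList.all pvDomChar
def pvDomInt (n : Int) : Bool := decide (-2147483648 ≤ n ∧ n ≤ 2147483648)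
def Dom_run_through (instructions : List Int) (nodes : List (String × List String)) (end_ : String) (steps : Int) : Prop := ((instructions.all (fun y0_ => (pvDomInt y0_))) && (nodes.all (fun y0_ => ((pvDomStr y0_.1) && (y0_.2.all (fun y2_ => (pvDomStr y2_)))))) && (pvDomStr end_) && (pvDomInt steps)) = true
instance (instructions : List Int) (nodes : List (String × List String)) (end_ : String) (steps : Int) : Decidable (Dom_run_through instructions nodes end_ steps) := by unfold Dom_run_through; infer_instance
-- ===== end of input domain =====

-- B replaces A's pass-then-recurse structure by one flat loop over a cycling instruction index (objective: idiomatic).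

-- shared primitive: `nodes[end][instruction]` — first-match association lookup, then Python indexing (negative wraps)
def pvStep (nodes : List (String × List String)) (e : String) (c : Int) : Option String :=
  (pvLookup nodes e).bind (fun l => PySem.List.pyGet? l c)
where pvLookup : List (String × List String) → String → Option (List String)
  | [], _ => none
  | (k, v) :: rest, e => if k = e then some v else pvLookup rest e

-- ===== PORT A =====
-- the `for instruction in instructions` loop; Sum.inr = early `return steps` (or a raise, which Pre_ excludes)
def runA_loop (nodes : List (String × List String)) : List Int → String → Int → (String × Int) ⊕ Int
  | [], e, s => Sum.inl (e, s)
  | c :: rest, e, s =>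
    if e ≠ "ZZZ" then
      match pvStep nodes e c with
      | some e' => runA_loop nodes rest e' (s + 1)
      | none => Sum.inr s      -- Python raises KeyError/IndexError here; outside Pre_
    else Sum.inr s

-- the tail self-recursion `return run_through(...)`, fueled (fuel 0 = Python RecursionError; outside Pre_)
def runA_go (instructions : List Int) (nodes : List (String × List String)) : Nat → String → Int → Int
  | 0, _, s => s
  | f + 1, e, s =>
    match runA_loop nodes instructions e s with
    | Sum.inr r => r
    | Sum.inl (e', s') => runA_go instructions nodes f e' s'

def run_through (instructions : List Int) (nodes : List (String × List String)) (end_ : String) (steps : Int) : Int :=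
  runA_go instructions nodes ((nodes.length + 2) * instructions.length + 2) end_ steps

-- ===== PORT B =====
-- Source B's `while True` loop: check ZZZ at the top, step, advance i = (i+1) % n; fueled (Pre_ inputs return within fuel)
def runB_go (instructions : List Int) (nodes : List (String × List String)) (n : Int) : Nat → Int → String → Int → Int
  | 0, _, _, s => s
  | f + 1, i, e, s =>
    if e = "ZZZ" then s
    else
      match PySem.List.pyGet? instructions i with
      | none => s              -- Python raises IndexError here; outside Pre_
      | some c =>
        match pvStep nodes e c with
        | none => s            -- Python raises KeyError/IndexError here; outside Pre_
        | some e' => runB_go instructions nodes n f (PySem.Int.mod (i + 1) n) e' (s + 1)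

def run_through_alt (instructions : List Int) (nodes : List (String × List String)) (end_ : String) (steps : Int) : Int :=
  runB_go instructions nodes instructions.length ((nodes.length + 2) * instructions.length + 2) 0 end_ steps

-- ===== PRECONDITION & SPEC =====
-- one step of the walk on the state (instruction index, node); `none` = a failed lookup, "ZZZ" is absorbing
def pvStepFn (instructions : List Int) (nodes : List (String × List String)) : Option (Nat × String) → Option (Nat × String)
  | none => none
  | some (i, e) =>
    if e = "ZZZ" then some (i, e)
    else
      match instructions[i]? with
      | none => none
      | some c =>
        match pvStep nodes e c with
        | none => none
        | some e' => some ((i + 1) % instructions.length, e')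

def pvHitZZZ : Option (Nat × String) → Bool
  | some (_, e) => e = "ZZZ"
  | none => false

-- Pre_: instructions is nonempty and the walk from end_ reaches 'ZZZ' (within the pigeonhole bound
-- (|nodes|+2)·|instructions| steps, past which the walk provably cycles): exactly the inputs on which the
-- Python A returns instead of raising KeyError/IndexError or RecursionError.
def Pre_run_through (instructions : List Int) (nodes : List (String × List String)) (end_ : String) (steps : Int) : Prop :=
  instructions ≠ [] ∧
  ((List.range ((nodes.length + 2) * instructions.length + 1)).any
    (fun t => pvHitZZZ ((pvStepFn instructions nodes)^[t] (some (0, end_))))) = true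

instance (instructions : List Int) (nodes : List (String × List String)) (end_ : String) (steps : Int) : Decidable (Pre_run_through instructions nodes end_ steps) := by unfold Pre_run_through; infer_instance

def pvWitness_run_through : List Int × (List (String × List String)) × String × Int :=
  ([1], [("AAA", ["BBB", "ZZZ"])], "AAA", 0)

def Spec_run_through (instructions : List Int) (nodes : List (String × List String)) (end_ : String) (steps : Int) (out : Int) : Prop := out = run_through_alt instructions nodes end_ steps
instance (instructions : List Int) (nodes : List (String × List String)) (end_ : String) (steps : Int) (out : Int) : Decidable (Spec_run_through instructions nodes end_ steps out) := by unfold Spec_run_through; infer_instance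

-- ===== CLAIM (what is proved, stated in full; the proofs are below) =====
def Claim_equal_run_through : Prop := ∀ (instructions : List Int) (nodes : List (String × List String)) (end_ : String) (steps : Int), Dom_run_through instructions nodes end_ steps → Pre_run_through instructions nodes end_ steps → Spec_run_through instructions nodes end_ steps (run_through instructions nodes end_ steps)

-- ===== LEMMAS AND PROOFS =====

-- canonical flat walk (proof-only helper): Nat index, same step as both ports
def cwalk (instructions : List Int) (nodes : List (String × List String)) : Nat → Nat → String → Int → Int
  | 0, _, _, s => s
  | f + 1, i, e, s =>
    if e = "ZZZ" then s
    else
      match instructions[i]? with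
      | none => s
      | some c =>
        match pvStep nodes e c with
        | none => s
        | some e' => cwalk instructions nodes f ((i + 1) % instructions.length) e' (s + 1)

theorem cwalk_succ_zzz (instructions : List Int) (nodes : List (String × List String))
    (f i : Nat) (e : String) (s : Int) (hz : e = "ZZZ") :
    cwalk instructions nodes (f + 1) i e s = s := by
  simp [cwalk, hz]

theorem cwalk_succ_step (instructions : List Int) (nodes : List (String × List String))
    (f i : Nat) (e : String) (s : Int) (c : Int) (e' : String) (hz : ¬ e = "ZZZ")
    (hget : instructions[i]? = some c) (hstep : pvStep nodes e c = some e') :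
    cwalk instructions nodes (f + 1) i e s
      = cwalk instructions nodes f ((i + 1) % instructions.length) e' (s + 1) := by
  conv_lhs => rw [cwalk]
  simp [hz, hget, hstep]

-- a hit at fuel > 0 with e ≠ "ZZZ" forces a successful step
theorem hit_succ (instructions : List Int) (nodes : List (String × List String))
    (t : Nat) (i : Nat) (e : String) (hz : ¬ e = "ZZZ")
    (hhit : pvHitZZZ ((pvStepFn instructions nodes)^[t] (some (i, e))) = true) :
    ∃ t' c e', t = t' + 1 ∧ instructions[i]? = some c ∧ pvStep nodes e c = some e' ∧
      pvHitZZZ ((pvStepFn instructions nodes)^[t'] (some ((i + 1) % instructions.length, e'))) = true := by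
  obtain ⟨t', rfl⟩ : ∃ t', t = t' + 1 := by
    cases t with
    | zero =>
      exfalso
      simp only [Function.iterate_zero, id_eq, pvHitZZZ] at hhit
      exact hz (by simpa using hhit)
    | succ t' => exact ⟨t', rfl⟩
  cases hget : instructions[i]? with
  | none =>
    exfalso
    have hnone : pvStepFn instructions nodes (some (i, e)) = none := by
      simp [pvStepFn, hz, hget]
    rw [Function.iterate_succ_apply, hnone] at hhit
    simp [Function.iterate_fixed (by rfl : pvStepFn instructions nodes none = none), pvHitZZZ] at hhit
  | some c =>
    cases hstep : pvStep nodes e c with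
    | none =>
      exfalso
      have hnone : pvStepFn instructions nodes (some (i, e)) = none := by
        simp [pvStepFn, hz, hget, hstep]
      rw [Function.iterate_succ_apply, hnone] at hhit
      simp [Function.iterate_fixed (by rfl : pvStepFn instructions nodes none = none), pvHitZZZ] at hhit
    | some e' =>
      have hsome : pvStepFn instructions nodes (some (i, e))
          = some ((i + 1) % instructions.length, e') := by
        simp [pvStepFn, hz, hget, hstep]
      rw [Function.iterate_succ_apply, hsome] at hhit
      refine ⟨t', c, e', rfl, ?_, ?_, ?_⟩
      · rfl
      · exact hstep
      · exact hhit

theorem runB_eq_cwalk (instructions : List Int) (nodes : List (String × List String))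
    (hn : instructions ≠ []) :
    ∀ (f : Nat) (i : Nat) (e : String) (s : Int), i < instructions.length →
      runB_go instructions nodes instructions.length f (i : Int) e s = cwalk instructions nodes f i e s := by
  intro f
  induction f with
  | zero => intro i e s _; rfl
  | succ f ih =>
    intro i e s hi
    simp only [runB_go, cwalk]
    by_cases hz : e = "ZZZ"
    · simp [hz]
    · simp only [if_neg hz, PySem.List.pyGet?_natCast]
      cases hget : instructions[i]? with
      | none => simp
      | some c =>
        cases hstep : pvStep nodes e c with
        | none => simp [hstep]
        | some e' =>
          have hlen : 0 < instructions.length := List.length_pos_iff.mpr hn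
          have hmod : PySem.Int.mod ((i : Int) + 1) (instructions.length : Int)
              = (((i + 1) % instructions.length : Nat) : Int) := by
            have h1 : ((i : Int) + 1) = ((i + 1 : Nat) : Int) := by push_cast; ring
            rw [h1, PySem.Int.mod_natCast]
          simp only [hstep, hmod]
          exact ih ((i + 1) % instructions.length) e' (s + 1) (Nat.mod_lt _ hlen)

-- stability of cwalk under one unit of extra fuel once the walk hits ZZZ within the fuel
theorem cwalk_stable (instructions : List Int) (nodes : List (String × List String)) :
    ∀ (f : Nat) (i : Nat) (e : String) (s : Int),
      (∃ t < f, pvHitZZZ ((pvStepFn instructions nodes)^[t] (some (i, e))) = true) →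
      cwalk instructions nodes (f + 1) i e s = cwalk instructions nodes f i e s := by
  intro f
  induction f with
  | zero => rintro i e s ⟨t, ht, _⟩; omega
  | succ f ih =>
    rintro i e s ⟨t, ht, hhit⟩
    by_cases hz : e = "ZZZ"
    · rw [cwalk_succ_zzz _ _ _ _ _ _ hz, cwalk_succ_zzz _ _ _ _ _ _ hz]
    · obtain ⟨t', c, e', rfl, hget, hstep, hhit'⟩ := hit_succ instructions nodes t i e hz hhit
      rw [cwalk_succ_step _ _ _ _ _ _ _ _ hz hget hstep,
          cwalk_succ_step _ _ _ _ _ _ _ _ hz hget hstep]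
      exact ih _ e' (s + 1) ⟨t', by omega, hhit'⟩

-- the continuation after A's pass: early return, or recurse into the next pass
def runA_cont (instructions : List Int) (nodes : List (String × List String)) (p : Nat) :
    (String × Int) ⊕ Int → Int
  | Sum.inr r => r
  | Sum.inl (e', s') => runA_go instructions nodes p e' s'

-- A's pass+recursion equals the flat walk, given a hit within fuel f ≤ pass-fuel p
theorem runA_eq_cwalk (instructions : List Int) (nodes : List (String × List String)) :
    ∀ (f : Nat), ∀ (rest : List Int) (p : Nat) (i : Nat) (e : String) (s : Int),
      (∃ t < f, pvHitZZZ ((pvStepFn instructions nodes)^[t] (some (i, e))) = true) →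
      f ≤ p → i + rest.length = instructions.length → instructions.drop i = rest → rest ≠ [] →
      runA_cont instructions nodes p (runA_loop nodes rest e s) = cwalk instructions nodes f i e s := by
  intro f
  induction f with
  | zero => rintro rest p i e s ⟨t, ht, _⟩; omega
  | succ f ih =>
    intro rest p i e s hhit hfp hilen hdrop hne
    cases rest with
    | nil => exact absurd rfl hne
    | cons c0 rs =>
      have hget0 : instructions[i]? = some c0 := by
        have h0 : (instructions.drop i)[0]? = instructions[i + 0]? := List.getElem?_drop
        rw [hdrop] at h0
        simpa using h0.symm
      by_cases hz : e = "ZZZ"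
      · have hloop : runA_loop nodes (c0 :: rs) e s = Sum.inr s := by
          simp [runA_loop, hz]
        rw [hloop, cwalk_succ_zzz _ _ _ _ _ _ hz]
        rfl
      · obtain ⟨t, ht, hhit1⟩ := hhit
        obtain ⟨t', c, e', rfl, hget, hstep, hhit'⟩ := hit_succ instructions nodes t i e hz hhit1
        have hc : c = c0 := by rw [hget0] at hget; exact (Option.some_inj.mp hget).symm
        subst hc
        have hloop : runA_loop nodes (c :: rs) e s = runA_loop nodes rs e' (s + 1) := by
          simp [runA_loop, hz, hstep]
        rw [hloop, cwalk_succ_step _ _ _ _ _ _ _ _ hz hget hstep]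
        have hhit2 : ∃ u < f, pvHitZZZ ((pvStepFn instructions nodes)^[u]
            (some ((i + 1) % instructions.length, e'))) = true := ⟨t', by omega, hhit'⟩
        cases rs with
        | nil =>
          -- pass boundary: i+1 = length, the wrapped index is 0 and A recurses into the next pass
          have hlen : i + 1 = instructions.length := by simpa using hilen
          have hmod : (i + 1) % instructions.length = 0 := by rw [hlen, Nat.mod_self]
          rw [hmod] at hhit2 ⊢
          have hf1 : 1 ≤ f := by obtain ⟨u, hu, _⟩ := hhit2; omega
          obtain ⟨p', rfl⟩ : ∃ p', p = p' + 1 := by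
            cases p with
            | zero => omega
            | succ p' => exact ⟨p', rfl⟩
          have hinsne : instructions ≠ [] := by
            intro h; rw [h] at hlen; simp at hlen
          exact ih instructions p' 0 e' (s + 1) hhit2 (by omega) (by simp) (by simp) hinsne
        | cons c2 rs2 =>
          have hi1 : i + 1 < instructions.length := by simp at hilen ⊢; omega
          have hmod : (i + 1) % instructions.length = i + 1 := Nat.mod_eq_of_lt hi1
          rw [hmod] at hhit2 ⊢
          have hdrop' : instructions.drop (i + 1) = c2 :: rs2 := by
            have hdd : (instructions.drop i).tail = instructions.drop (i + 1) := by
              rw [← List.drop_drop]; simp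
            rw [← hdd, hdrop]; rfl
          exact ih (c2 :: rs2) p (i + 1) e' (s + 1) hhit2 (by omega)
            (by simp at hilen ⊢; omega) hdrop' (by simp)

-- ===== VERDICT (by name: the statement is the Claim_ definition above) =====
theorem run_through_spec : Claim_equal_run_through := by
  intro instructions nodes end_ steps _ hpre
  obtain ⟨hne, hany⟩ := hpre
  rw [List.any_eq_true] at hany
  obtain ⟨t, htmem, hhit⟩ := hany
  rw [List.mem_range] at htmem
  have hlen : 0 < instructions.length := List.length_pos_iff.mpr hne
  set F : Nat := (nodes.length + 2) * instructions.length + 1 with hF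
  have hhitF : ∃ t < F, pvHitZZZ ((pvStepFn instructions nodes)^[t] (some (0, end_))) = true :=
    ⟨t, htmem, hhit⟩
  unfold Spec_run_through run_through run_through_alt
  have hB : runB_go instructions nodes instructions.length (F + 1) ((0 : Nat) : Int) end_ steps
      = cwalk instructions nodes (F + 1) 0 end_ steps :=
    runB_eq_cwalk instructions nodes hne (F + 1) 0 end_ steps hlen
  have hstab : cwalk instructions nodes (F + 1) 0 end_ steps
      = cwalk instructions nodes F 0 end_ steps := cwalk_stable instructions nodes F 0 end_ steps hhitF
  have hA : runA_go instructions nodes (F + 1) end_ steps = cwalk instructions nodes F 0 end_ steps := by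
    have hcont : runA_go instructions nodes (F + 1) end_ steps
        = runA_cont instructions nodes F (runA_loop nodes instructions end_ steps) := by
      rw [runA_go]; rfl
    rw [hcont]
    exact runA_eq_cwalk instructions nodes F instructions F 0 end_ steps hhitF (le_refl F)
      (by simp) (by simp) hne
  have hB' : runB_go instructions nodes instructions.length (F + 1) (0 : Int) end_ steps
      = cwalk instructions nodes (F + 1) 0 end_ steps := by simpa using hB
  have hF2 : (nodes.length + 2) * instructions.length + 2 = F + 1 := by omega
  rw [hF2, hA, hB', hstab]
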